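/- GENERATED by mk_final_copies.py from the proof of the farm's unit `inverse_mdct.2` (farm:inverse_mdct.2.1: Proof.lean) as the
   re-elaboration sweep compiled it — do not edit. -/
import Asan.CheckWalk
import Vorbis.Spec.MdctUse
import Vorbis.Spec.Units.inverse_mdct_2

open X86 X86.User Asan Vorbis Vorbis.Spec

set_option maxRecDepth 4000
set_option maxHeartbeats 4000000

namespace Vorbis.Spec.inverse_mdct_2

/-- **Where the temp block is**, as arithmetic for `u_omega`: above the image's text, inside the data space, off the stack
region (the arena is: AR1x), 8-aligned. -/
theorem tmp_where {others : List Obj} {frames : List (Nat × FrameLayout)} {len : Nat} {A : Arena} {stored room : Int}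
    {ysz : Nat → Nat} {k c : Nat} {ue : State}
    (hpre : inverse_mdct.Pre others frames len A stored room ysz k c ue) :
    1154368 ≤ inverse_mdct.tmp A ue ∧ inverse_mdct.tmp A ue + 2 * inverse_mdct.n ue ≤ 12582912 ∧
    (inverse_mdct.tmp A ue + 2 * inverse_mdct.n ue ≤ 7340032 ∨ 8388608 ≤ inverse_mdct.tmp A ue) := by
  have hr := hpre.tmp_range
  have hAT : 1154368 ≤ A.B := hpre.arenaText
  have h1 := hpre.ado.ok.AR1
  have h1x := hpre.ado.ok.AR1x
  have h2 := hpre.ado.ok.AR2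
  omega

/-- **The frame rule of one iteration of L1**: the iteration stores three return addresses at `[rsp − 8]` (the check calls), one
float at the scratch slot `[rbp − 50H]` and two floats `d[1]`, `d[0]` into the temp block; every slot the assertion speaks of is
kept, and `Body` is carried by `Body.carry`. -/
theorem iter_carry {u₀ : State} {others : List Obj} {frames : List (Nat × FrameLayout)} {len : Nat} {A : Arena}
    {stored room : Int} {ysz : Nat → Nat} {k c : Nat} {ue : State} {ret : Word} {v s : State} {r12 : Word}
    {a b c' d e g : Nat}
    (hbody : inverse_mdct.Body u₀ others frames len A stored room ysz k c ue ret v)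
    (hsBuf : inverse_mdct.SlotsBuf ue v) (hsA : inverse_mdct.SlotsA ue v)
    (hn4 : v.mem.readLE (ue.reg .rsp - 136) 4 = inverse_mdct.n ue / 4)
    (hlo : inverse_mdct.tmp A ue ≤ r12.toNat) (hup : r12.toNat + 8 ≤ inverse_mdct.tmp A ue + 2 * inverse_mdct.n ue)
    (w_mem : s.mem =
      (((((v.mem.writeLE (ue.reg .rsp - 192) 8 a).writeLE (ue.reg .rsp - 88) 4 b).writeLE (ue.reg .rsp - 192) 8 c').writeLE
        (r12 + 4) 4 d).writeLE (ue.reg .rsp - 192) 8 e).writeLE r12 4 g)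
    (hcode : CodeOK u₀ s.mem) (habi : abiInv s)
    (hrbp : s.reg .rbp = ue.reg .rsp - 8) (hrsp : s.reg .rsp = ue.reg .rsp - 184) :
    inverse_mdct.Body u₀ others frames len A stored room ysz k c ue ret s ∧ inverse_mdct.SlotsBuf ue s ∧
    inverse_mdct.SlotsA ue s ∧ s.mem.readLE (ue.reg .rsp - 136) 4 = inverse_mdct.n ue / 4 := by
  have hroom := hbody.entry.room
  have htop := hbody.entry.top
  simp only [vspec, conv_stackLo, conv_stackHi] at hroom htop
  obtain ⟨ht1, ht2, ht3⟩ := tmp_where hbody.pre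
  have q0 : UInt64.ofNat (s.mem.readLE (ue.reg .rsp) 8) = ret := by u_frame hbody.retSlot
  have q1 : UInt64.ofNat (s.mem.readLE (ue.reg .rsp - 8) 8) = ue.reg .rbp := by u_frame hbody.rbpSlot
  have q2 : UInt64.ofNat (s.mem.readLE (ue.reg .rsp - 16) 8) = ue.reg .r15 := by u_frame hbody.r15Slot
  have q3 : UInt64.ofNat (s.mem.readLE (ue.reg .rsp - 24) 8) = ue.reg .r14 := by u_frame hbody.r14Slot
  have q4 : UInt64.ofNat (s.mem.readLE (ue.reg .rsp - 32) 8) = ue.reg .r13 := by u_frame hbody.r13Slot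
  have q5 : UInt64.ofNat (s.mem.readLE (ue.reg .rsp - 40) 8) = ue.reg .r12 := by u_frame hbody.r12Slot
  have q6 : UInt64.ofNat (s.mem.readLE (ue.reg .rsp - 48) 8) = ue.reg .rbx := by u_frame hbody.rbxSlot
  have q7 : UInt64.ofNat (s.mem.readLE (ue.reg .rsp - 128) 8) = ue.reg .rdx := by u_frame hbody.fSlot
  have q8 : s.mem.readLE (ue.reg .rsp - 132) 4 = inverse_mdct.bt ue := by u_frame hbody.btSlot
  have q9 : s.mem.readLE (ue.reg .rsp - 152) 4 = A.T := by u_frame hbody.saveSlot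
  have q10 : s.mem.readLE (ue.reg .rsp - 112) 8 = inverse_mdct.tmp A ue := by u_frame hbody.vSlot
  have p1 : UInt64.ofNat (s.mem.readLE (ue.reg .rsp - 64) 8) = ue.reg .rdi := by u_frame hsBuf.uSlot
  have p2 : s.mem.readLE (ue.reg .rsp - 76) 4 = inverse_mdct.n ue := by u_frame hsBuf.nSlot
  have p3 : s.mem.readLE (ue.reg .rsp - 176) 8 = inverse_mdct.buf ue + 4 * (inverse_mdct.n ue / 2) := by
    u_frame hsBuf.uMidSlot
  have p4 : s.mem.readLE (ue.reg .rsp - 72) 8 = inverse_mdct.tabA ue := by u_frame hsA.aSlot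
  have p5 : s.mem.readLE (ue.reg .rsp - 120) 4 = inverse_mdct.n ue / 2 := by u_frame hsA.n2Slot
  have p6 : s.mem.readLE (ue.reg .rsp - 144) 8 = 4 * (inverse_mdct.n ue / 2) := by u_frame hsA.n2x4Slot
  have p7 : s.mem.readLE (ue.reg .rsp - 148) 4 = inverse_mdct.n ue / 8 := by u_frame hsA.n8Slot
  have p8 : s.mem.readLE (ue.reg .rsp - 136) 4 = inverse_mdct.n ue / 4 := by u_frame hn4
  have hs : Mem.SameExcept
      [⟨(ue.reg .rsp).toNat - 368, (ue.reg .rsp).toNat⟩,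
       ⟨inverse_mdct.buf ue, inverse_mdct.buf ue + 4 * inverse_mdct.n ue⟩,
       ⟨inverse_mdct.tmp A ue, inverse_mdct.tmp A ue + 2 * inverse_mdct.n ue⟩] v.mem s.mem := by
    u_same
  exact ⟨inverse_mdct.Body.carry hbody hs hcode habi hrbp hrsp q0 q1 q2 q3 q4 q5 q6 q7 q8 q9 q10,
    ⟨p1, p2, p3⟩, ⟨p4, p5, p6, p7⟩, p8⟩


/-- **Segment 2 of `inverse_mdct`, with the loop invariant generalised** (`loop1` = 1093A2H, line 2692 `while (e != e_stop)`; body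
10930DH … 10939EH; tail 1093ABH … 1093BFH `jmp loop2`). The entry assertion `At2` is the case `t = 0`.
INVARIANT after `t ≤ n / 8` iterations (`Mdct.L1`): `Body`, FRAME0 (`SlotsBuf`, `SlotsA`, `d[rbp − 80H]`), `r13 = u + 16 t`,
`rbx = A + 8 t`, `r12 + 8 t + 8 = v + 4·n2`, `r15 = &u[n2]`. MEASURE `r15 − r13` (= `16 (n / 8 − t)`: the test is an EQUALITY,
exact because `16 ∣ 4·n2`). The six check sites are inside the live blocks `u` (M6), `A` (M3) and the temp block `v`. -/
theorem seg2 {Lay : Layout} (hLay : Lay.hi = 0x1000000) {μ : Microarch} (hμ : UserX.MicroOK μ) {u₀ : State}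
    (hcode : HasCodeNat Lay u₀ Vorbis.L.inverse_mdct.entry Vorbis.Code.code_inverse_mdct.nat Vorbis.L.inverse_mdct.size)
    (hload4 : Asan.SmallCheck Lay μ Vorbis.WayInv (Vorbis.CodeOK u₀) [.rax, .rcx, .rdx] 4 Vorbis.L.__asan_load4_noabort.entry)
    (hstore4 : Asan.SmallCheck Lay μ Vorbis.WayInv (Vorbis.CodeOK u₀) [.rax, .rcx, .rdx] 4 Vorbis.L.__asan_store4_noabort.entry)
    {others : List Obj} {frames : List (Nat × FrameLayout)} {len : Nat} {A : Arena} {stored room : Int} {ysz : Nat → Nat}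
    {k c : Nat} {ue : State} {ret : Word} {v : State}
    (hat : inverse_mdct.At2 u₀ others frames len A stored room ysz k c ue ret v) :
    ReachVia Lay μ WayInv v (fun w => inverse_mdct.At3 u₀ others frames len A stored room ysz k c ue ret w) := by
  obtain ⟨hrip, hbody, hsBuf, hsA, hn4, h13, hbx, h12, h15⟩ := hat
  -- 1. the ENTRY state's facts (about `ue`)
  have he := hbody.entry
  have hpre := hbody.pre
  v_entry he
  -- the numbers: `n` is a block size; where `u`, `A` and `v` are (none of these mentions the present state)
  have hnf := hpre.isBlocksize.facts
  have hnle := hpre.n_le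
  have hbd := inverse_mdct.buf_def ue
  obtain ⟨ht1, ht2, ht3⟩ := tmp_where hpre
  have hbufin := hpre.ok.inside _ hpre.buf_blk
  have hAin := hpre.ok.inside _ hpre.tabA_blk
  simp only [] at hbufin hAin
  -- the three live ranges of the check sites, in the live set of `Body.shadow` (with the temp block)
  have hLu : LiveBytes (A.newTempObj (2 * inverse_mdct.n ue) :: others) frames (inverse_mdct.buf ue)
      (4 * bsize ue.mem (inverse_mdct.f ue) 1) :=
    LiveBytes.of_block (hpre.blkLive _ _ hpre.buf_blk) (Nat.le_refl _) (Nat.le_refl _)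
  have hLA : LiveBytes (A.newTempObj (2 * inverse_mdct.n ue) :: others) frames (inverse_mdct.tabA ue)
      (2 * inverse_mdct.n ue) :=
    LiveBytes.of_block (hpre.blkLive _ _ hpre.tabA_blk) (Nat.le_refl _) (Nat.le_refl _)
  have hLv : LiveBytes (A.newTempObj (2 * inverse_mdct.n ue) :: others) frames (inverse_mdct.tmp A ue)
      (2 * inverse_mdct.n ue) := inverse_mdct.tmp_live A ue
  -- 2. the loop head (1093A2H, line 2692): the pointers generalised to `t` completed iterations
  obtain ⟨t, ht, h13t, hbxt, h12t⟩ : ∃ t : Nat, t ≤ inverse_mdct.n ue / 8 ∧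
      (v.reg .r13).toNat = inverse_mdct.buf ue + 16 * t ∧
      (v.reg .rbx).toNat = inverse_mdct.tabA ue + 8 * t ∧
      (v.reg .r12).toNat + 8 * t + 8 = inverse_mdct.tmp A ue + 4 * (inverse_mdct.n ue / 2) :=
    ⟨0, Nat.zero_le _, h13, hbx, h12⟩
  clear h13 hbx h12
  u_loop [t] (fun s => (s.reg .r15).toNat - (s.reg .r13).toNat)
  -- the present state under the names the walker reads (NOT `w_…`: the walker clears those of the state it leaves)
  have hrsp := hbody.rsp
  have hrbp := hbody.rbp
  have w_eq : Mem.EqOn Vorbis.L.textLo Vorbis.L.textHi u₀.mem v.mem := hbody.code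
  have hdf : v.flags .df = false := (show abiInv _ from hbody.abi).1
  have hmx : v.mxcsr &&& 0x1F80 = 0x1F80 := (show abiInv _ from hbody.abi).2
  have hsse := Vorbis.sseOK_of_abiInv hbody.abi
  -- the three slots the tail loads: `q[rbp − 38H] = u`, `q[rbp − 88H] = 4·n2`, `q[rbp − 68H] = v`
  have su := hsBuf.uSlot
  have sn2 := hsA.n2x4Slot
  have sv := hbody.vSlot
  u_walk hcode [hμ.vendor] until [Vorbis.L.inverse_mdct.loop1, Vorbis.L.inverse_mdct.loop2] span [Vorbis.L.textLo, Vorbis.L.textHi] side (v_side)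
  case check_109310 =>
    -- 109310H, line 2693: `e[0]` = `u[4t]`
    have hun : ShadowUntouched v.mem s_109310.mem := by v_untouched
    exact hLu.accSmall hbody.shadow hun _ 4 (by decide) (by u_omega) (by u_omega)
  case check_10931c =>
    -- 10931CH, line 2693: `AA[0]` = `A[2t]`
    have hun : ShadowUntouched v.mem s_10931c.mem := by v_untouched
    exact hLA.accSmall hbody.shadow hun _ 4 (by decide) (by u_omega) (by u_omega)
  case check_109333 =>
    -- 109333H, line 2693: `e[2]` = `u[4t + 2]`
    have hun : ShadowUntouched v.mem s_109333.mem := by v_untouched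
    exact hLu.accSmall hbody.shadow hun _ 4 (by decide) (by u_omega) (by u_omega)
  case check_109340 =>
    -- 109340H, line 2693: `AA[1]` = `A[2t + 1]`
    have hun : ShadowUntouched v.mem s_109340.mem := by v_untouched
    exact hLA.accSmall hbody.shadow hun _ 4 (by decide) (by u_omega) (by u_omega)
  case check_109362 =>
    -- 109362H, line 2693: the store `d[1]` = `v[n2 − 1 − 2t]`
    have hun : ShadowUntouched v.mem s_109362.mem := by v_untouched
    exact hLv.accSmall hbody.shadow hun _ 4 (by decide) (by u_omega) (by u_omega)
  case check_10938d =>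
    -- 10938DH, line 2694: the store `d[0]` = `v[n2 − 2 − 2t]`
    have hun : ShadowUntouched v.mem s_10938d.mem := by v_untouched
    exact hLv.accSmall hbody.shadow hun _ 4 (by decide) (by u_omega) (by u_omega)
  · -- 3. the back edge (10939EH → 1093A2H): the invariant for `t + 1`, the measure decreases by 16
    have habi : abiInv s_10939e := by v_inv
    have hrbp' : s_10939e.reg .rbp = ue.reg .rsp - 8 := by
      rw [w_kept .rbp rfl]
      exact hrbp
    have hlo : inverse_mdct.tmp A ue ≤ (v.reg .r12).toNat := by u_omega
    have hup : (v.reg .r12).toNat + 8 ≤ inverse_mdct.tmp A ue + 2 * inverse_mdct.n ue := by u_omega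
    obtain ⟨hbody', hsBuf', hsA', hn4'⟩ := iter_carry hbody hsBuf hsA hn4 hlo hup w_mem w_eq habi hrbp' w_rsp
    -- (`Body`, `SlotsBuf`, `SlotsA`, `d[rbp − 80H]` are in the context: closed by `u_loop_back` itself)
    u_loop_back [t + 1]
    · rw [w_kept .r15 rfl]
      exact h15
    · u_omega
    · rw [w_r13]
      u_omega
    · rw [w_rbx]
      u_omega
    · rw [w_r12]
      u_omega
    · rw [w_r13, w_kept .r15 rfl]
      u_omega
  · -- 4. the exit (1093BFH `jmp loop2`, lines 2700–2701): `e = e_stop`, so `t = n / 8`; the assertion `At3`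
    have hs : Mem.SameExcept
        [⟨(ue.reg .rsp).toNat - 368, (ue.reg .rsp).toNat⟩,
         ⟨inverse_mdct.buf ue, inverse_mdct.buf ue + 4 * inverse_mdct.n ue⟩,
         ⟨inverse_mdct.tmp A ue, inverse_mdct.tmp A ue + 2 * inverse_mdct.n ue⟩] v.mem s_1093bf.mem := by
      rw [w_mem]
      exact Mem.SameExcept.refl _ _
    have habi : abiInv s_1093bf := by v_inv
    have hrbp' : s_1093bf.reg .rbp = ue.reg .rsp - 8 := by
      rw [w_kept .rbp rfl]
      exact hrbp
    have hrsp' : s_1093bf.reg .rsp = ue.reg .rsp - 184 := by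
      rw [w_kept .rsp rfl]
      exact hrsp
    have hbody' : inverse_mdct.Body u₀ others frames len A stored room ysz k c ue ret s_1093bf := by
      refine inverse_mdct.Body.carry hbody hs w_eq habi hrbp' hrsp' ?_ ?_ ?_ ?_ ?_ ?_ ?_ ?_ ?_ ?_ ?_
      · rw [w_mem]
        exact hbody.retSlot
      · rw [w_mem]
        exact hbody.rbpSlot
      · rw [w_mem]
        exact hbody.r15Slot
      · rw [w_mem]
        exact hbody.r14Slot
      · rw [w_mem]
        exact hbody.r13Slot
      · rw [w_mem]
        exact hbody.r12Slot
      · rw [w_mem]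
        exact hbody.rbxSlot
      · rw [w_mem]
        exact hbody.fSlot
      · rw [w_mem]
        exact hbody.btSlot
      · rw [w_mem]
        exact hbody.saveSlot
      · rw [w_mem]
        exact hbody.vSlot
    refine ReachVia.done (Or.inl ⟨w_rip, hbody', ⟨?_, ?_, ?_⟩, ⟨?_, ?_, ?_, ?_⟩, ?_, ?_, ?_, ?_, ?_⟩)
    · rw [w_mem]
      exact hsBuf.uSlot
    · rw [w_mem]
      exact hsBuf.nSlot
    · rw [w_mem]
      exact hsBuf.uMidSlot
    · rw [w_mem]
      exact hsA.aSlot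
    · rw [w_mem]
      exact hsA.n2Slot
    · rw [w_mem]
      exact hsA.n2x4Slot
    · rw [w_mem]
      exact hsA.n8Slot
    · rw [w_mem]
      exact hn4
    · -- `r12 = &v[n4 − 2]`
      rw [w_kept .r12 rfl]
      u_omega
    · -- `rbx = &A[n4]`
      rw [w_kept .rbx rfl]
      u_omega
    · -- `r13 = &u[n2 − 3]`
      rw [w_r13]
      u_omega
    · -- `r15 = v`
      rw [w_r15]
      u_omega

end Vorbis.Spec.inverse_mdct_2

/-- Unit `inverse_mdct.2`: segment 2 of `inverse_mdct` (loop L1 and the L2 set-up) takes `At2` to `At3`. -/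
theorem Vorbis.Spec.Worked.inverse_mdct_2_ok : Vorbis.Spec.inverse_mdct_2.Statement := by
  intro Lay hLay μ hμ u₀ hcode hload4 hstore4 others frames len A stored room ysz k c ue ret v hat
  exact Vorbis.Spec.inverse_mdct_2.seg2 hLay hμ hcode hload4 hstore4 hat
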